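-- pv_equiv track=rewrite | github.com/NiharP31/DML-OpenProblem | Problems/Edge_pixel_counter/solution.py | count_edge_pixels
-- ===== SOURCE A (Python) =====
-- def count_edge_pixels(
--     img: list[list[int]]
-- ) -> int:
--     # Check if image is empty
--     if not img or not img[0]:
--         return -1
--
--     rows, cols = len(img), len(img[0])
--
--     # Validate dimensions and binary values
--     for row in img:
--         if len(row) != cols:
--             return -1
--         for pixel in row:
--             if pixel not in [0, 1]:
--                 return -1
--
--     # Count edge pixels
--     edge_count = 0
--
--     # Define 8-connected neighborhood directions
--     neighbors = [
--         (-1, -1), (-1, 0), (-1, 1),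
--         (0, -1),           (0, 1),
--         (1, -1),  (1, 0),  (1, 1)
--     ]
--
--     for i in range(rows):
--         for j in range(cols):
--             # Only check neighborhoods of 1-valued pixels
--             if img[i][j] == 1:
--                 # Check all 8 neighbors
--                 for di, dj in neighbors:
--                     ni, nj = i + di, j + dj
--                     # If neighbor is outside image or has value 0
--                     if (ni < 0 or ni >= rows or
--                         nj < 0 or nj >= cols or
--                         img[ni][nj] == 0):
--                         edge_count += 1
--                         break
--
--     return edge_count
-- ===== SOURCE B (Python) =====
-- def count_edge_pixels(
--     img: list[list[int]]
-- ) -> int: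
--     # Validation (same contract as the original): empty / ragged / non-binary -> -1
--     if not img or not img[0]:
--         return -1
--     rows, cols = len(img), len(img[0])
--     if all(len(r) == cols and all(p in (0, 1) for p in r) for r in img):
--         # Complement counting: every 1-pixel is an edge pixel unless it is strictly
--         # interior with its whole 3x3 neighborhood equal to 1.
--         total_ones = sum(r.count(1) for r in img)
--         non_edge = sum(
--             1
--             for i in range(1, rows - 1)
--             for j in range(1, cols - 1)
--             if img[i-1][j-1] == 1 and img[i-1][j] == 1 and img[i-1][j+1] == 1
--             and img[i][j-1] == 1 and img[i][j] == 1 and img[i][j+1] == 1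
--             and img[i+1][j-1] == 1 and img[i+1][j] == 1 and img[i+1][j+1] == 1
--         )
--         return total_ones - non_edge
--     return -1
-- ===== Notes on version B (the rewrite author's own statement) =====
-- stated objective: alternative
-- what changed: Replaces A's direct nested scan that marks each 1-pixel having a 0-or-border neighbor (inner 8-neighbor loop with break) by complement counting: total 1-pixels via per-row count(1), minus a comprehension-sum over strictly interior cells whose explicit 3x3 block is all ones; result is total_ones - non_edge, and validation is an all(...) guard instead of an early-return loop.
import Mathlib
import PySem

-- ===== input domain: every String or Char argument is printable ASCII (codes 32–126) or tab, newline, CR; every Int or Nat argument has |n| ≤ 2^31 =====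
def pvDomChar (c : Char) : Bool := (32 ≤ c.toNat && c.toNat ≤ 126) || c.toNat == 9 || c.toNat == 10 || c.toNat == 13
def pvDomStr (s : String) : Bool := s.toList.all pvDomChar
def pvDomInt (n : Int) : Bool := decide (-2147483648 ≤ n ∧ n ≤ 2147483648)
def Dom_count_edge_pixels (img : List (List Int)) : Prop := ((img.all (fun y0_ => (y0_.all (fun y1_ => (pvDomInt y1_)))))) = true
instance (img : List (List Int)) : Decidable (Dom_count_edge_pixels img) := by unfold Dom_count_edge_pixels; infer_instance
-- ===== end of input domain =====

-- B replaces A's direct "mark each 1-pixel with a 0/out-of-range neighbor" scan by complement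
-- counting: per-row count(1) totals minus the number of strictly-interior all-ones 3x3 blocks
-- (objective: alternative decomposition, same value everywhere).

-- ===== PORT A =====
-- pixel access img[i][j] (only evaluated in range in both programs)
def pvPix (img : List (List Int)) (i j : Int) : Int :=
  PySem.List.pyGetD (PySem.List.pyGetD img i []) j 0

def pvNeighbors : List (Int × Int) :=
  [(-1,-1),(-1,0),(-1,1),(0,-1),(0,1),(1,-1),(1,0),(1,1)]

-- the break-ing inner neighbor loop of A: did some neighbor fire?
def pvBadNbr (img : List (List Int)) (rows cols i j : Int) (d : Int × Int) : Bool :=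
  decide (i + d.1 < 0) || decide (i + d.1 ≥ rows) ||
  decide (j + d.2 < 0) || decide (j + d.2 ≥ cols) ||
  (pvPix img (i + d.1) (j + d.2) == 0)

def count_edge_pixels (img : List (List Int)) : Int :=
  if img = [] ∨ PySem.List.pyGetD img 0 [] = [] then -1 else
  let rows : Int := img.length
  let cols : Int := (PySem.List.pyGetD img 0 []).length
  -- validation loop: early return -1 at the first ragged row / non-binary pixel
  if img.any (fun row => !((row.length : Int) == cols && row.all (fun p => p == 0 || p == 1))) then -1 else
  (PySem.List.pyRange 0 rows 1).foldl (fun acc i =>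
    (PySem.List.pyRange 0 cols 1).foldl (fun acc j =>
      if pvPix img i j = 1 then
        if pvNeighbors.any (fun d => pvBadNbr img rows cols i j d) then acc + 1 else acc
      else acc) acc) 0

-- ===== PORT B =====
-- the nine explicit conjuncts of B's interior all-ones 3x3 test
def pvFull (img : List (List Int)) (i j : Int) : Bool :=
  pvPix img (i-1) (j-1) == 1 && pvPix img (i-1) j == 1 && pvPix img (i-1) (j+1) == 1 &&
  pvPix img i (j-1) == 1 && pvPix img i j == 1 && pvPix img i (j+1) == 1 &&
  pvPix img (i+1) (j-1) == 1 && pvPix img (i+1) j == 1 && pvPix img (i+1) (j+1) == 1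

def count_edge_pixels_alt (img : List (List Int)) : Int :=
  match img with
  | [] => -1
  | r0 :: _ =>
    if r0 = [] then -1 else
    let rows : Int := img.length
    let cols : Int := r0.length
    if img.all (fun row => ((row.length : Int) == cols) && row.all (fun p => p == 0 || p == 1)) then
      let totalOnes : Int := (img.map (fun r => (r.count 1 : Int))).sum
      let nonEdge : Int :=
        (((PySem.List.pyRange 1 (rows - 1) 1).map (fun i =>
            ((PySem.List.pyRange 1 (cols - 1) 1).filter (fun j => pvFull img i j)).length)).sum : Nat)
      totalOnes - nonEdge
    else -1

-- ===== PRECONDITION & SPEC =====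
def Spec_count_edge_pixels (img : List (List Int)) (out : Int) : Prop := out = count_edge_pixels_alt img
instance (img : List (List Int)) (out : Int) : Decidable (Spec_count_edge_pixels img out) := by unfold Spec_count_edge_pixels; infer_instance

-- ===== CLAIM (what is proved, stated in full; the proofs are below) =====
def Claim_equal_count_edge_pixels : Prop := ∀ (img : List (List Int)), Dom_count_edge_pixels img → Spec_count_edge_pixels img (count_edge_pixels img)

-- ===== LEMMAS AND PROOFS =====

-- proof-side helpers: the 3x3 offset list and indicator functions used to relate the two loops
def pvDeltas : List (Int × Int) :=
  [(-1,-1),(-1,0),(-1,1),(0,-1),(0,0),(0,1),(1,-1),(1,0),(1,1)]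

def pvFA (img : List (List Int)) (rows cols i j : Int) : Int :=
  if pvPix img i j = 1 then
    (if pvNeighbors.any (fun d => pvBadNbr img rows cols i j d) then 1 else 0)
  else 0

def pvFN (img : List (List Int)) (i j : Int) : Int :=
  if pvDeltas.all (fun d => pvPix img (i + d.1) (j + d.2) == 1) then 1 else 0

-- a doubly nested accumulating foldl is a double sum
lemma pvFoldl2 (f : Int → Int → Int) (a b c d : Int) :
    (PySem.List.pyRange a b 1).foldl
        (fun acc i => (PySem.List.pyRange c d 1).foldl (fun acc j => acc + f i j) acc) 0
      = ((PySem.List.pyRange a b 1).map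
          (fun i => ((PySem.List.pyRange c d 1).map (f i)).sum)).sum := by
  have h : (fun (acc : Int) i => (PySem.List.pyRange c d 1).foldl (fun acc j => acc + f i j) acc)
      = fun (acc : Int) i => acc + ((PySem.List.pyRange c d 1).map (f i)).sum := by
    funext acc i; rw [PySem.List.foldl_add]
  rw [h, PySem.List.foldl_add]; simp

-- a sum over a subrange is a sum over the full range of the indicator-guarded function
lemma pvSumExt (h : Int → Int) (a b lo hi : Int) (h1 : a ≤ lo) (h2 : hi ≤ b) :
    ((PySem.List.pyRange lo hi 1).map h).sum
      = ((PySem.List.pyRange a b 1).map (fun i => if lo ≤ i ∧ i < hi then h i else 0)).sum := by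
  by_cases hlh : lo < hi
  · rw [PySem.List.pyRange_one_append a lo b h1 (by omega),
        PySem.List.pyRange_one_append lo hi b (le_of_lt hlh) h2,
        List.map_append, List.map_append, List.sum_append, List.sum_append]
    have hz1 : ((PySem.List.pyRange a lo 1).map (fun i => if lo ≤ i ∧ i < hi then h i else 0)).sum = 0 := by
      apply List.sum_eq_zero; intro x hx
      simp only [List.mem_map] at hx; obtain ⟨i, hi_, rfl⟩ := hx
      rw [PySem.List.mem_pyRange_one] at hi_
      rw [if_neg (by omega)]
    have hz2 : ((PySem.List.pyRange hi b 1).map (fun i => if lo ≤ i ∧ i < hi then h i else 0)).sum = 0 := by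
      apply List.sum_eq_zero; intro x hx
      simp only [List.mem_map] at hx; obtain ⟨i, hi_, rfl⟩ := hx
      rw [PySem.List.mem_pyRange_one] at hi_
      rw [if_neg (by omega)]
    have hm : ((PySem.List.pyRange lo hi 1).map (fun i => if lo ≤ i ∧ i < hi then h i else 0))
        = (PySem.List.pyRange lo hi 1).map h := by
      apply List.map_congr_left; intro i hi_
      rw [PySem.List.mem_pyRange_one] at hi_
      rw [if_pos (by omega)]
    rw [hz1, hz2, hm]; ring
  · rw [PySem.List.pyRange_one_eq_nil (by omega)]
    symm
    apply List.sum_eq_zero; intro x hx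
    simp only [List.mem_map] at hx; obtain ⟨i, hi_, rfl⟩ := hx
    rw [PySem.List.mem_pyRange_one] at hi_
    rw [if_neg (by omega)]

lemma pvSumSub {α : Type} (l : List α) (f g : α → Int) :
    ((l.map fun x => f x - g x)).sum = (l.map f).sum - (l.map g).sum := by
  induction l with
  | nil => simp
  | cons x xs ih => simp [ih]; ring

lemma pvBinary (img : List (List Int)) (cols : Int)
    (hv : ∀ row ∈ img, (row.length : Int) = cols ∧ ∀ p ∈ row, p = 0 ∨ p = 1)
    (i j : Int) (hi0 : 0 ≤ i) (hi1 : i < (img.length : Int)) (hj0 : 0 ≤ j) (hj1 : j < cols) :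
    pvPix img i j = 0 ∨ pvPix img i j = 1 := by
  unfold pvPix
  have hrow : PySem.List.pyGetD img i [] ∈ img :=
    by apply PySem.List.pyGetD_mem; unfold PySem.Raise.InRange; omega
  obtain ⟨hlen, hbin⟩ := hv _ hrow
  have hpix : PySem.List.pyGetD (PySem.List.pyGetD img i []) j 0 ∈ PySem.List.pyGetD img i [] :=
    by apply PySem.List.pyGetD_mem; unfold PySem.Raise.InRange; rw [hlen]; omega
  exact hbin _ hpix

-- the two main loops compute the same value on a validated image
lemma pvNbrBound : ∀ d ∈ pvNeighbors, -1 ≤ d.1 ∧ d.1 ≤ 1 ∧ -1 ≤ d.2 ∧ d.2 ≤ 1 := by decide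

lemma pvNbrSub : ∀ d ∈ pvNeighbors, d ∈ pvDeltas := by decide

lemma pvDeltaCases : ∀ d ∈ pvDeltas, d = (0, 0) ∨ d ∈ pvNeighbors := by decide

lemma pvPointwise (img : List (List Int)) (rows cols : Int)
    (hrows : rows = (img.length : Int))
    (hv : ∀ row ∈ img, (row.length : Int) = cols ∧ ∀ p ∈ row, p = 0 ∨ p = 1)
    (i j : Int) (hi0 : 0 ≤ i) (hi1 : i < rows) (hj0 : 0 ≤ j) (hj1 : j < cols) :
    pvFA img rows cols i j
      = pvPix img i j
        - (if 1 ≤ i ∧ i < rows - 1 then (if 1 ≤ j ∧ j < cols - 1 then pvFN img i j else 0) else 0) := by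
  have hbin : ∀ x y : Int, 0 ≤ x → x < rows → 0 ≤ y → y < cols →
      pvPix img x y = 0 ∨ pvPix img x y = 1 := fun x y h1 h2 h3 h4 =>
    pvBinary img cols hv x y h1 (by omega) h3 h4
  unfold pvFA
  by_cases hp : pvPix img i j = 1
  · rw [if_pos hp]
    by_cases hint : (1 ≤ i ∧ i < rows - 1) ∧ (1 ≤ j ∧ j < cols - 1)
    · rw [if_pos hint.1, if_pos hint.2]
      unfold pvFN
      have hnbr : ∀ d ∈ pvNeighbors,
          pvBadNbr img rows cols i j d = !(pvPix img (i + d.1) (j + d.2) == 1) := by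
        intro d hd
        obtain ⟨hb1, hb2, hb3, hb4⟩ := pvNbrBound d hd
        obtain ⟨⟨hI1, hI2⟩, hJ1, hJ2⟩ := hint
        unfold pvBadNbr
        have h1 : ¬ (i + d.1 < 0) := by omega
        have h2 : ¬ (i + d.1 ≥ rows) := by omega
        have h3 : ¬ (j + d.2 < 0) := by omega
        have h4 : ¬ (j + d.2 ≥ cols) := by omega
        simp only [h1, h2, h3, h4, decide_false, Bool.false_or]
        rcases hbin (i + d.1) (j + d.2) (by omega) (by omega) (by omega) (by omega) with h | h <;>
          simp [h]
      by_cases hall : pvDeltas.all (fun d => pvPix img (i + d.1) (j + d.2) == 1) = true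
      · rw [hall]
        have hany : pvNeighbors.any (fun d => pvBadNbr img rows cols i j d) = false := by
          rw [List.any_eq_false]
          intro d hd
          rw [hnbr d hd]
          have := List.all_eq_true.mp hall d (pvNbrSub d hd)
          simp [this]
        rw [hany]
        simp [hp]
      · rw [Bool.not_eq_true] at hall
        rw [hall]
        have hany : pvNeighbors.any (fun d => pvBadNbr img rows cols i j d) = true := by
          have hex := List.all_eq_false.mp hall
          obtain ⟨d, hd, hne⟩ := hex
          have hdnbr : d ∈ pvNeighbors := by
            rcases pvDeltaCases d hd with h | h
            · exfalso; rw [h] at hne; simp [hp] at hne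
            · exact h
          rw [List.any_eq_true]
          exact ⟨d, hdnbr, by rw [hnbr d hdnbr]; simp only [Bool.not_eq_true']; exact eq_false_of_ne_true hne⟩
        rw [hany]
        simp [hp]
    · have hz : (if 1 ≤ i ∧ i < rows - 1 then (if 1 ≤ j ∧ j < cols - 1 then pvFN img i j else 0) else 0) = 0 := by
        split_ifs with hA hB
        · exact absurd ⟨hA, hB⟩ hint
        · rfl
        · rfl
      rw [hz]
      have hc : i < 1 ∨ rows - 1 ≤ i ∨ j < 1 ∨ cols - 1 ≤ j := by
        by_contra hc
        push Not at hc
        exact hint ⟨⟨by omega, by omega⟩, by omega, by omega⟩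
      have hany : pvNeighbors.any (fun d => pvBadNbr img rows cols i j d) = true := by
        rw [List.any_eq_true]
        rcases hc with h | h | h | h
        · exact ⟨(-1, 0), by decide, by unfold pvBadNbr; simp; omega⟩
        · exact ⟨(1, 0), by decide, by unfold pvBadNbr; simp; omega⟩
        · exact ⟨(0, -1), by decide, by unfold pvBadNbr; simp; omega⟩
        · exact ⟨(0, 1), by decide, by unfold pvBadNbr; simp; omega⟩
      rw [hany]
      simp [hp]
  · rw [if_neg hp]
    have h0 : pvPix img i j = 0 := by
      rcases hbin i j hi0 hi1 hj0 hj1 with h | h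
      · exact h
      · exact absurd h hp
    have hfn : pvFN img i j = 0 := by
      unfold pvFN
      cases hB : pvDeltas.all (fun d => pvPix img (i + d.1) (j + d.2) == 1) with
      | false => simp
      | true =>
        exfalso
        have := List.all_eq_true.mp hB (0, 0) (by decide)
        simp [h0] at this
    rw [hfn]
    split_ifs <;> simp [h0]

lemma pvMain (img : List (List Int)) (rows cols : Int)
    (hrows : rows = (img.length : Int))
    (hv : ∀ row ∈ img, (row.length : Int) = cols ∧ ∀ p ∈ row, p = 0 ∨ p = 1) :
    (PySem.List.pyRange 0 rows 1).foldl (fun acc i =>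
      (PySem.List.pyRange 0 cols 1).foldl (fun acc j =>
        if pvPix img i j = 1 then
          if pvNeighbors.any (fun d => pvBadNbr img rows cols i j d) then acc + 1 else acc
        else acc) acc) 0
    = (img.map List.sum).sum
      - (PySem.List.pyRange 1 (rows - 1) 1).foldl (fun acc i =>
          (PySem.List.pyRange 1 (cols - 1) 1).foldl (fun acc j =>
            if pvDeltas.all (fun d => pvPix img (i + d.1) (j + d.2) == 1) then acc + 1 else acc) acc) 0 := by
  subst hrows
  have h1 : ∀ (acc i : Int), i ∈ PySem.List.pyRange 0 (img.length : Int) 1 →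
      (PySem.List.pyRange 0 cols 1).foldl (fun acc j =>
        if pvPix img i j = 1 then
          if pvNeighbors.any (fun d => pvBadNbr img (img.length : Int) cols i j d) then acc + 1 else acc
        else acc) acc
      = (PySem.List.pyRange 0 cols 1).foldl
          (fun acc j => acc + pvFA img (img.length : Int) cols i j) acc := by
    intro acc i _
    apply PySem.List.foldl_congr_mem
    intro a j _
    unfold pvFA
    split_ifs <;> ring
  have hA : (PySem.List.pyRange 0 (img.length : Int) 1).foldl (fun acc i =>
      (PySem.List.pyRange 0 cols 1).foldl (fun acc j =>
        if pvPix img i j = 1 then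
          if pvNeighbors.any (fun d => pvBadNbr img (img.length : Int) cols i j d) then acc + 1 else acc
        else acc) acc) 0
      = (PySem.List.pyRange 0 (img.length : Int) 1).foldl (fun acc i =>
          (PySem.List.pyRange 0 cols 1).foldl
            (fun acc j => acc + pvFA img (img.length : Int) cols i j) acc) 0 :=
    PySem.List.foldl_congr_mem _ _ _ _ h1
  rw [hA, pvFoldl2 (fun i j => pvFA img (img.length : Int) cols i j) 0 (img.length : Int) 0 cols]
  have h2 : ∀ (acc i : Int), i ∈ PySem.List.pyRange 1 ((img.length : Int) - 1) 1 →
      (PySem.List.pyRange 1 (cols - 1) 1).foldl (fun acc j =>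
        if pvDeltas.all (fun d => pvPix img (i + d.1) (j + d.2) == 1) then acc + 1 else acc) acc
      = (PySem.List.pyRange 1 (cols - 1) 1).foldl (fun acc j => acc + pvFN img i j) acc := by
    intro acc i _
    apply PySem.List.foldl_congr_mem
    intro a j _
    unfold pvFN
    split_ifs <;> ring
  have hB : (PySem.List.pyRange 1 ((img.length : Int) - 1) 1).foldl (fun acc i =>
      (PySem.List.pyRange 1 (cols - 1) 1).foldl (fun acc j =>
        if pvDeltas.all (fun d => pvPix img (i + d.1) (j + d.2) == 1) then acc + 1 else acc) acc) 0
      = (PySem.List.pyRange 1 ((img.length : Int) - 1) 1).foldl (fun acc i =>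
          (PySem.List.pyRange 1 (cols - 1) 1).foldl (fun acc j => acc + pvFN img i j) acc) 0 :=
    PySem.List.foldl_congr_mem _ _ _ _ h2
  rw [hB, pvFoldl2 (fun i j => pvFN img i j) 1 ((img.length : Int) - 1) 1 (cols - 1)]
  have hT : (img.map List.sum).sum
      = ((PySem.List.pyRange 0 (img.length : Int) 1).map
          (fun i => ((PySem.List.pyRange 0 cols 1).map (fun j => pvPix img i j)).sum)).sum := by
    have hrw : (PySem.List.pyRange 0 (img.length : Int) 1).map
          (fun i => ((PySem.List.pyRange 0 cols 1).map (fun j => pvPix img i j)).sum)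
        = (PySem.List.pyRange 0 (img.length : Int) 1).map
          (fun i => (PySem.List.pyGetD img i []).sum) := by
      apply List.map_congr_left
      intro i hi
      rw [PySem.List.mem_pyRange_one] at hi
      have hrow : PySem.List.pyGetD img i [] ∈ img := by
        apply PySem.List.pyGetD_mem
        unfold PySem.Raise.InRange
        omega
      obtain ⟨hlen, _⟩ := hv _ hrow
      have hinner : (PySem.List.pyRange 0 cols 1).map (fun j => pvPix img i j)
          = PySem.List.pyGetD img i [] := by
        unfold pvPix
        rw [← hlen]
        exact PySem.List.map_pyGetD_pyRange_zero' (PySem.List.pyGetD img i []) 0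
      rw [hinner]
    rw [hrw]
    have := PySem.List.map_pyGetD_pyRange_zero' img ([] : List Int)
    calc (img.map List.sum).sum
        = (((PySem.List.pyRange 0 (img.length : Int) 1).map
            (fun i => PySem.List.pyGetD img i [])).map List.sum).sum := by rw [this]
      _ = ((PySem.List.pyRange 0 (img.length : Int) 1).map
            (fun i => (PySem.List.pyGetD img i []).sum)).sum := by rw [List.map_map]; rfl
  rw [hT]
  have hNI : ((PySem.List.pyRange 1 ((img.length : Int) - 1) 1).map
        (fun i => ((PySem.List.pyRange 1 (cols - 1) 1).map (fun j => pvFN img i j)).sum)).sum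
      = ((PySem.List.pyRange 0 (img.length : Int) 1).map
          (fun i => ((PySem.List.pyRange 0 cols 1).map
            (fun j => if 1 ≤ i ∧ i < (img.length : Int) - 1 then
                        (if 1 ≤ j ∧ j < cols - 1 then pvFN img i j else 0) else 0)).sum)).sum := by
    rw [pvSumExt (fun i => ((PySem.List.pyRange 1 (cols - 1) 1).map (fun j => pvFN img i j)).sum)
          0 (img.length : Int) 1 ((img.length : Int) - 1) (by omega) (by omega)]
    congr 1
    apply List.map_congr_left
    intro i _
    by_cases hP : 1 ≤ i ∧ i < (img.length : Int) - 1
    · rw [if_pos hP]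
      rw [pvSumExt (fun j => pvFN img i j) 0 cols 1 (cols - 1) (by omega) (by omega)]
      congr 1
      apply List.map_congr_left
      intro j _
      rw [if_pos hP]
    · rw [if_neg hP]
      symm
      apply List.sum_eq_zero
      intro x hx
      simp only [List.mem_map] at hx
      obtain ⟨j, _, rfl⟩ := hx
      rw [if_neg hP]
  rw [hNI]
  rw [← pvSumSub]
  apply congrArg List.sum
  apply List.map_congr_left
  intro i hi
  rw [PySem.List.mem_pyRange_one] at hi
  rw [← pvSumSub]
  apply congrArg List.sum
  apply List.map_congr_left
  intro j hj
  rw [PySem.List.mem_pyRange_one] at hj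
  exact pvPointwise img (img.length : Int) cols rfl hv i j (by omega) (by omega) (by omega) (by omega)

-- B's explicit 9-conjunct block test is A's delta-list test
lemma pvFull_eq (img : List (List Int)) (i j : Int) :
    pvFull img i j = pvDeltas.all (fun d => pvPix img (i + d.1) (j + d.2) == 1) := by
  simp [pvFull, pvDeltas, List.all, sub_eq_add_neg, Bool.and_assoc]

-- for a binary row, the sum is the count of ones
lemma pvRowSum (r : List Int) (hb : ∀ p ∈ r, p = 0 ∨ p = 1) :
    r.sum = (r.count 1 : Int) := by
  induction r with
  | nil => simp
  | cons p t ih =>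
    have hp := hb p (by simp)
    have ht := ih (fun q hq => hb q (by simp [hq]))
    rcases hp with h | h <;> simp [h, ht]; ring

-- B's interior comprehension-sum equals the old-style indicator double loop
lemma pvNonEdge (img : List (List Int)) (rows cols : Int) :
    ((((PySem.List.pyRange 1 (rows - 1) 1).map (fun i =>
        ((PySem.List.pyRange 1 (cols - 1) 1).filter (fun j => pvFull img i j)).length)).sum : Nat) : Int)
    = (PySem.List.pyRange 1 (rows - 1) 1).foldl (fun acc i =>
        (PySem.List.pyRange 1 (cols - 1) 1).foldl (fun acc j =>
          if pvDeltas.all (fun d => pvPix img (i + d.1) (j + d.2) == 1) then acc + 1 else acc) acc) 0 := by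
  have hin : ∀ (acc i : Int), i ∈ PySem.List.pyRange 1 (rows - 1) 1 →
      (PySem.List.pyRange 1 (cols - 1) 1).foldl (fun acc j =>
        if pvDeltas.all (fun d => pvPix img (i + d.1) (j + d.2) == 1) then acc + 1 else acc) acc
      = acc + (((PySem.List.pyRange 1 (cols - 1) 1).filter (fun j => pvFull img i j)).length : Int) := by
    intro acc i _
    rw [PySem.List.foldl_if_add_one]
    congr 1
    rw [List.countP_eq_length_filter,
        List.filter_congr (fun j _ => (pvFull_eq img i j).symm)]
  rw [PySem.List.foldl_congr_mem _ _ _ _ hin, PySem.List.foldl_add]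
  simp [List.map_map]
  induction (PySem.List.pyRange 1 (rows - 1) 1) with
  | nil => simp
  | cons x t ih => simp [ih]

lemma pvAnyNot {α : Type} (l : List α) (p : α → Bool) : (l.any fun x => !p x) = !l.all p := by
  induction l with
  | nil => rfl
  | cons x t ih => simp [ih, Bool.not_and]

lemma pvEq (img : List (List Int)) : count_edge_pixels img = count_edge_pixels_alt img := by
  cases img with
  | nil => rfl
  | cons r0 rest =>
    have hget0 : PySem.List.pyGetD (r0 :: rest) 0 [] = r0 := by
      simp [PySem.List.pyGetD, PySem.List.pyGet?, PySem.List.pyIdx?]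
    unfold count_edge_pixels count_edge_pixels_alt
    simp only []
    rw [hget0]
    by_cases h0 : r0 = []
    · simp [h0]
    · simp only [List.cons_ne_nil, false_or, if_neg h0]
      rw [pvAnyNot]
      by_cases hb : ((r0 :: rest).all fun row => ((row.length : Int) == (r0.length : Int)) && row.all fun p => p == 0 || p == 1) = true
      · rw [hb]
        rw [if_neg (by simp), if_pos rfl]
        have hv : ∀ row ∈ (r0 :: rest), (row.length : Int) = (r0.length : Int) ∧ ∀ p ∈ row, p = 0 ∨ p = 1 := by
          intro row hrow
          have h := List.all_eq_true.mp hb row hrow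
          simp only [Bool.and_eq_true, beq_iff_eq, List.all_eq_true, Bool.or_eq_true] at h
          exact h
        rw [pvMain (r0 :: rest) _ _ rfl hv,
            ← pvNonEdge (r0 :: rest) (((r0 :: rest).length : Int)) ((r0.length : Int))]
        congr 1
        exact congrArg List.sum (List.map_congr_left fun row hrow => pvRowSum row (hv row hrow).2)
      · rw [Bool.not_eq_true] at hb
        simp [hb]

-- ===== VERDICT (by name: the statement is the Claim_ definition above) =====
theorem count_edge_pixels_spec : Claim_equal_count_edge_pixels := by
  intro img _
  unfold Spec_count_edge_pixels
  exact pvEq img
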